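-- pv_equiv track=rewrite | github.com/triwinds/ns-emu-tools | module/cheats.py | _convert_ops_to_content
-- ===== SOURCE A (Python) =====
-- from typing import List, Dict
--
-- def _convert_ops_to_content(ops: List[str]):
--     if not ops:
--         return '\n'
--     content = ''
--     for i, op in enumerate(ops):
--         content += op
--         content += '\n' if i % 3 == 2 else ' '
--     return content
-- ===== SOURCE B (Python) =====
-- from typing import List, Dict
--
-- def _convert_ops_to_content(ops: List[str]):
--     if not ops:
--         return '\n'
--     parts = []
--     for j in range(0, len(ops), 3):
--         chunk = ops[j:j + 3]
--         parts.append(' '.join(chunk) + ('\n' if len(chunk) == 3 else ' '))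
--     return ''.join(parts)
-- ===== Notes on version B (the rewrite author's own statement) =====
-- stated objective: simpler
-- what changed: B processes the list in chunks of three built by slicing and joins each chunk with ' ' plus a '\n' (or ' ' for a short trailing chunk), instead of A's per-element index-mod-3 branching with string accumulation.
import Mathlib
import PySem

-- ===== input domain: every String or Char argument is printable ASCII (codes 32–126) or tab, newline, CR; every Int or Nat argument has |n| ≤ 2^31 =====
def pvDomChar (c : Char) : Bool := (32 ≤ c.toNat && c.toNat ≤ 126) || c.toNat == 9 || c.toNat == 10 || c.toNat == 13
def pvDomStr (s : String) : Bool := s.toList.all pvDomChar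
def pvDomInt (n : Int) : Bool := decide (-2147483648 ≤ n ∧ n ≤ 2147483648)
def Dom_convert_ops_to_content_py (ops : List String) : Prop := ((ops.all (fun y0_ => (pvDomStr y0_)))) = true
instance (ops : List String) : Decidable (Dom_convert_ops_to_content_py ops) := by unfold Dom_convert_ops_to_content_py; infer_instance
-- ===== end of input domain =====

-- B builds the content from three-element chunks joined with ' ' instead of A's per-element index-mod-3 loop (objective: simpler decomposition).


-- ===== PORT A =====
-- the for-loop over enumerate(ops): index i, accumulator content
def convertAuxA : List String → Nat → String → String
  | [], _, content => content
  | op :: rest, i, content =>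
      convertAuxA rest (i + 1) (content ++ op ++ (if i % 3 == 2 then "\n" else " "))

def convert_ops_to_content_py (ops : List String) : String :=
  if ops = [] then "\n" else convertAuxA ops 0 ""

-- ===== PORT B =====
-- the chunk loop: ops[j:j+3] for j = 0,3,6,…, each chunk ' '.join-ed (PySem.Str.join) with its terminator
def convertChunksB : List String → String
  | [] => ""
  | [a] => PySem.Str.join " " [a] ++ " "
  | [a, b] => PySem.Str.join " " [a, b] ++ " "
  | a :: b :: c :: rest => PySem.Str.join " " [a, b, c] ++ "\n" ++ convertChunksB rest

def convert_ops_to_content_py_alt (ops : List String) : String :=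
  if ops = [] then "\n" else convertChunksB ops

-- ===== PRECONDITION & SPEC =====
def Spec_convert_ops_to_content_py (ops : List String) (out : String) : Prop := out = convert_ops_to_content_py_alt ops
instance (ops : List String) (out : String) : Decidable (Spec_convert_ops_to_content_py ops out) := by unfold Spec_convert_ops_to_content_py; infer_instance

-- ===== CLAIM (what is proved, stated in full; the proofs are below) =====
def Claim_equal_convert_ops_to_content_py : Prop := ∀ (ops : List String), Dom_convert_ops_to_content_py ops → Spec_convert_ops_to_content_py ops (convert_ops_to_content_py ops)

-- ===== LEMMAS AND PROOFS =====
theorem convertAuxA_eq_chunks (ops : List String) :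
    ∀ (i : Nat) (content : String), i % 3 = 0 →
      (convertAuxA ops i content).toList = content.toList ++ (convertChunksB ops).toList := by
  induction ops using convertChunksB.induct with
  | case1 => intro i content _; simp [convertAuxA, convertChunksB]
  | case2 a =>
      intro i content hi
      simp [convertAuxA, convertChunksB, hi, PySem.Str.join, PySem.Chars.join, List.intercalate]
  | case3 a b =>
      intro i content hi
      have h1 : (i + 1) % 3 = 1 := by omega
      simp [convertAuxA, convertChunksB, hi, h1, PySem.Str.join, PySem.Chars.join, List.intercalate]
  | case4 a b c rest ih =>
      intro i content hi
      have h1 : (i + 1) % 3 = 1 := by omega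
      have h2 : (i + 1 + 1) % 3 = 2 := by omega
      have h3 : (i + 1 + 1 + 1) % 3 = 0 := by omega
      simp only [convertAuxA, hi, h1, h2]
      rw [ih _ _ h3]
      simp [convertChunksB, PySem.Str.join, PySem.Chars.join, List.intercalate]

-- ===== VERDICT (by name: the statement is the Claim_ definition above) =====
theorem convert_ops_to_content_py_spec : Claim_equal_convert_ops_to_content_py := by
  intro ops _
  unfold Spec_convert_ops_to_content_py convert_ops_to_content_py convert_ops_to_content_py_alt
  by_cases h : ops = [] <;> simp [h]
  apply String.toList_inj.mp
  rw [convertAuxA_eq_chunks ops 0 "" rfl]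
  simp
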